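-- pv_equiv track=rewrite | github.com/jlewisbrewer/tetris | lib/translatable.py | translate_shape
-- ===== SOURCE A (Python) =====
-- def translate_shape(shape, x_offset, y_offset):
--     """
--     The function to transform binary number into locations
--     on a 2d grid
--
--     Parameters:
--         shape (int) : a index that references constants.SHAPES list
--         x_offset (int) : x coord for placing shape on 2d grid
--         y_offset (int) : y coord for placing shape on 2d grid
--
--     Returns:
--         block_locations (list) : a list of coordinates for tetrino blocks
--             into the requisite shape
--     """
--     block_locations = []
--     tmp_x = x_offset
--     binary_number = '{0:016b}'.format(shape)
--     for i in range(len(binary_number)):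
--         if i % 4 == 0 and i != 0:
--             y_offset += 1
--             tmp_x = x_offset
--         if binary_number[i] == '1':
--             coords = [tmp_x, y_offset]
--             block_locations.append(coords)
--         tmp_x += 1
--     return block_locations
-- ===== SOURCE B (Python) =====
-- def translate_shape(shape, x_offset, y_offset):
--     def rows(bits, y):
--         if not bits:
--             return []
--         return ([[x_offset + c, y] for c, ch in enumerate(bits[:4]) if ch == '1']
--                 + rows(bits[4:], y + 1))
--     return rows('{0:016b}'.format(shape), y_offset)
-- ===== Notes on version B (the rewrite author's own statement) =====
-- stated objective: alternative
-- what changed: Replaces A's single indexed loop with a mutable x-cursor and a row-advance sentinel branch by a recursion that slices the bit string into 4-character rows (bits[:4]/bits[4:]) and emits per-row column offsets; there is no global index, no counter threading, and no i%4/i//4 arithmetic.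
import Mathlib
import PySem

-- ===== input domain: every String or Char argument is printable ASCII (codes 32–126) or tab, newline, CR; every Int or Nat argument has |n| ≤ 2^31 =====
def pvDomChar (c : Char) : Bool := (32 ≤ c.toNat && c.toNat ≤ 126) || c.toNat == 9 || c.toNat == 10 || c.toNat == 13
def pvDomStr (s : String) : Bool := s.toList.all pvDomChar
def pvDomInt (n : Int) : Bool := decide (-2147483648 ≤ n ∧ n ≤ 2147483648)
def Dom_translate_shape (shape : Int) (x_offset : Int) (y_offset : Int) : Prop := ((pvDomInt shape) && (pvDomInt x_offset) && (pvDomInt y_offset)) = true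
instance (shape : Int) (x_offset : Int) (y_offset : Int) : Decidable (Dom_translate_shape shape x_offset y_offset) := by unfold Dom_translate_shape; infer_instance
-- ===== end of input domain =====

-- B replaces A's indexed loop with mutable cursor state by a recursion that slices the bit
-- string into 4-character rows and emits per-row column offsets (objective: alternative).

-- ===== PORT A =====
-- '{0:016b}'.format(shape) = format(shape,'b') zero-padded to width 16, sign kept in front
-- = PySem.Chars.zfill (PySem.Int.toBinChars shape) 16 (exact).
def translate_shape (shape : Int) (x_offset : Int) (y_offset : Int) : List (List Int) :=
  let binary_number : List Char := PySem.Chars.zfill (PySem.Int.toBinChars shape) 16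
  let r := (List.range binary_number.length).foldl
    (fun (st : List (List Int) × Int × Int) (i : Nat) =>
      -- st = (block_locations, tmp_x, y_offset)
      let y := if i % 4 == 0 && i != 0 then st.2.2 + 1 else st.2.2
      let tmp_x := if i % 4 == 0 && i != 0 then x_offset else st.2.1
      let acc := if PySem.List.pyGet? binary_number (i : Int) = some '1'
                 then st.1 ++ [[tmp_x, y]] else st.1
      (acc, tmp_x + 1, y))
    ([], x_offset, y_offset)
  r.1

-- ===== PORT B =====
-- inner helper 'rows': recursion on the bit string sliced into 4-char rows
def translateRows (x_offset : Int) (bits : List Char) (y : Int) : List (List Int) :=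
  if h : bits = [] then []
  else
    ((PySem.List.enumerate (PySem.List.slice bits none (some (4 : Int))) 0).filterMap
       (fun p => if p.2 = '1' then some [x_offset + p.1, y] else none))
    ++ translateRows x_offset (PySem.List.slice bits (some (4 : Int)) none) (y + 1)
termination_by bits.length
decreasing_by
  rw [PySem.List.slice_from bits (by omega : (0:Int) ≤ 4)]
  have : bits.length ≠ 0 := by simpa using h
  simp; omega

def translate_shape_alt (shape : Int) (x_offset : Int) (y_offset : Int) : List (List Int) :=
  translateRows x_offset (PySem.Chars.zfill (PySem.Int.toBinChars shape) 16) y_offset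

-- ===== PRECONDITION & SPEC =====
def Spec_translate_shape (shape : Int) (x_offset : Int) (y_offset : Int) (out : List (List Int)) : Prop := out = translate_shape_alt shape x_offset y_offset
instance (shape : Int) (x_offset : Int) (y_offset : Int) (out : List (List Int)) : Decidable (Spec_translate_shape shape x_offset y_offset out) := by unfold Spec_translate_shape; infer_instance

-- ===== CLAIM =====
def Claim_equal_translate_shape : Prop := ∀ (shape : Int) (x_offset : Int) (y_offset : Int), Dom_translate_shape shape x_offset y_offset → Spec_translate_shape shape x_offset y_offset (translate_shape shape x_offset y_offset)

-- ===== LEMMAS AND PROOFS =====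

-- A's loop over the first n indices: accumulator in index-formula form, plus the cursor state.
theorem loopA_eq (x y0 : Int) (cs : List Char) (n : Nat) :
    (List.range n).foldl
      (fun (st : List (List Int) × Int × Int) (i : Nat) =>
        let y := if i % 4 == 0 && i != 0 then st.2.2 + 1 else st.2.2
        let tmp_x := if i % 4 == 0 && i != 0 then x else st.2.1
        let acc := if PySem.List.pyGet? cs (i : Int) = some '1'
                   then st.1 ++ [[tmp_x, y]] else st.1
        (acc, tmp_x + 1, y))
      ([], x, y0)
    = ((List.range n).filterMap
         (fun i => if cs[i]? = some '1'
                   then some [x + ((i % 4 : Nat) : Int), y0 + ((i / 4 : Nat) : Int)]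
                   else none),
       x + (((if n = 0 then 0 else (n - 1) % 4 + 1) : Nat) : Int),
       y0 + (((n - 1) / 4 : Nat) : Int)) := by
  induction n with
  | zero => simp
  | succ n ih =>
    rw [List.range_succ, List.foldl_append, List.filterMap_append, ih]
    simp only [List.foldl_cons, List.foldl_nil, List.filterMap_cons, List.filterMap_nil]
    have hget : PySem.List.pyGet? cs (n : Int) = cs[n]? := PySem.List.pyGet?_natCast cs n
    by_cases hb : n % 4 == 0 && n != 0
    · have h4 : n % 4 = 0 := by
        rcases Bool.and_eq_true_iff.mp hb with ⟨h1, _⟩; simpa using h1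
      have hn0 : n ≠ 0 := by
        rcases Bool.and_eq_true_iff.mp hb with ⟨_, h2⟩; simpa using h2
      simp only [hb, if_true, hget]
      by_cases hc : cs[n]? = some '1' <;>
        simp only [hc, if_true, if_false, List.append_nil] <;>
        refine Prod.ext ?_ (Prod.ext ?_ ?_) <;> simp <;>
        first
          | (constructor <;> push_cast <;> omega)
          | (push_cast; omega)
    · simp only [hb, hget]
      have hb' : ¬ (n % 4 = 0 ∧ n ≠ 0) := by
        intro ⟨h1, h2⟩
        exact absurd (by simp [h1, h2] : (n % 4 == 0 && n != 0) = true) hb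
      by_cases hc : cs[n]? = some '1' <;>
        simp only [hc, if_true, if_false, List.append_nil] <;>
        refine Prod.ext ?_ (Prod.ext ?_ ?_) <;> simp <;>
        first
          | (constructor <;> push_cast <;> omega)
          | (push_cast; omega)

-- One row of B: the enumerate-comprehension in index-formula form.
theorem rowB_eq (x y : Int) (ds : List Char) (s : Nat) :
    (PySem.List.enumerate ds (s : Int)).filterMap
      (fun p => if p.2 = '1' then some [x + p.1, y] else none)
    = (List.range ds.length).filterMap
        (fun i => if ds[i]? = some '1' then some [x + ((s + i : Nat) : Int), y] else none) := by
  induction ds generalizing s with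
  | nil => simp [PySem.List.enumerate_nil]
  | cons d ds ih =>
    rw [PySem.List.enumerate_cons, List.filterMap_cons]
    have hs1 : (s : Int) + 1 = ((s + 1 : Nat) : Int) := by push_cast; ring
    rw [hs1, ih (s + 1)]
    rw [List.length_cons, List.range_succ_eq_map, List.filterMap_cons, List.filterMap_map]
    have htail : List.filterMap
        (fun i => if ds[i]? = some '1'
                  then some [x + ((s + 1 + i : Nat) : Int), y] else none) (List.range ds.length)
      = List.filterMap
        ((fun i => if (d :: ds)[i]? = some '1'
                   then some [x + ((s + i : Nat) : Int), y] else none) ∘ Nat.succ)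
        (List.range ds.length) := by
      apply List.filterMap_congr
      intro a _
      have h1 : s + 1 + a = s + (a + 1) := by omega
      simp [Function.comp, h1]
    rw [htail]
    by_cases hc : d = '1' <;> simp [hc]

-- B's recursion in index-formula form: same filterMap as A's loop.
theorem rowsB_eq (x : Int) (cs : List Char) (y : Int) :
    translateRows x cs y
    = (List.range cs.length).filterMap
        (fun i => if cs[i]? = some '1'
                  then some [x + ((i % 4 : Nat) : Int), y + ((i / 4 : Nat) : Int)]
                  else none) := by
  induction cs, y using translateRows.induct with
  | case1 a => simp [translateRows]
  | case2 bits y h ih =>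
    rw [translateRows]
    simp only [h, dite_false]
    rw [PySem.List.slice_from bits (by omega : (0:Int) ≤ 4)] at ih
    rw [PySem.List.slice_to bits (by omega : (0:Int) ≤ 4),
        PySem.List.slice_from bits (by omega : (0:Int) ≤ 4), ih]
    have hrow := rowB_eq x y (List.take (Int.toNat 4) bits) 0
    simp only [Nat.zero_add, Nat.cast_zero] at hrow
    rw [hrow]
    simp only [show (4:Int).toNat = 4 from rfl]
    by_cases hle : bits.length ≤ 4
    · have hd : List.drop 4 bits = [] := List.drop_eq_nil_of_le (by omega)
      have ht : List.take 4 bits = bits := List.take_of_length_le (by omega)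
      rw [hd, ht]
      simp only [List.length_nil, List.range_zero, List.filterMap_nil, List.append_nil]
      apply List.filterMap_congr
      intro i hi
      have hi4 : i < 4 := by have := List.mem_range.mp hi; omega
      simp [Nat.mod_eq_of_lt hi4, Nat.div_eq_of_lt hi4]
    · have hn4 : bits.length = 4 + (bits.length - 4) := by omega
      have hsplit : List.range bits.length
          = List.range 4 ++ (List.range (bits.length - 4)).map (fun j => 4 + j) := by
        conv_lhs => rw [hn4]
        exact List.range_add
      rw [hsplit, List.filterMap_append, List.filterMap_map]
      congr 1
      · have hlt : (List.take 4 bits).length = 4 := by simp; omega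
        rw [hlt]
        apply List.filterMap_congr
        intro i hi
        have hi4 : i < 4 := List.mem_range.mp hi
        have hg : (List.take 4 bits)[i]? = bits[i]? := List.getElem?_take_of_lt hi4
        simp [hg, Nat.mod_eq_of_lt hi4, Nat.div_eq_of_lt hi4]
      · have hlen : (List.drop 4 bits).length = bits.length - 4 := by simp
        rw [hlen]
        apply List.filterMap_congr
        intro j _
        have hg : (List.drop 4 bits)[j]? = bits[4 + j]? := by
          rw [List.getElem?_drop]
        have h1 : (4 + j) % 4 = j % 4 := by omega
        have h2 : (4 + j) / 4 = j / 4 + 1 := by omega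
        simp only [Function.comp, hg, h1, h2]
        by_cases hc : bits[4 + j]? = some '1' <;> simp [hc] <;> push_cast <;> ring

-- ===== VERDICT =====
theorem translate_shape_spec : Claim_equal_translate_shape := by
  intro shape x y _
  show _ = _
  unfold translate_shape translate_shape_alt
  rw [rowsB_eq]
  simp only []
  rw [loopA_eq]
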